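-- pv_equiv track=rewrite | github.com/dshemetov/puzzles | advent-of-code-solutions/python/src/advent/advent2024/p21.py | transition_length
-- ===== SOURCE A (Python) =====
-- PATHS_BETWEEN_CHARACTERS_2X3 = {
--     ("^", "A"): [[">"]],
--     ("^", "v"): [["v"]],
--     ("^", ">"): [[">", "v"], ["v", ">"]],
--     ("^", "^"): [[]],
--     ("^", "<"): [["v", "<"]],
--     ("A", "A"): [[]],
--     ("A", "v"): [["<", "v"], ["v", "<"]],
--     ("A", ">"): [["v"]],
--     ("A", "^"): [["<"]],
--     ("A", "<"): [["v", "<", "<"], ["<", "v", "<"]],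
--     (">", "A"): [["^"]],
--     (">", "v"): [["<"]],
--     (">", ">"): [[]],
--     (">", "^"): [["<", "^"], ["^", "<"]],
--     (">", "<"): [["<", "<"]],
--     ("v", "A"): [["^", ">"], [">", "^"]],
--     ("v", "v"): [[]],
--     ("v", ">"): [[">"]],
--     ("v", "^"): [["^"]],
--     ("v", "<"): [["<"]],
--     ("<", "A"): [[">", ">", "^"], [">", "^", ">"]],
--     ("<", "v"): [[">"]],
--     ("<", ">"): [[">", ">"]],
--     ("<", "^"): [[">", "^"]],
--     ("<", "<"): [[]],
-- }
--
-- length_cache = {}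
--
-- def expand_length(sequence: list[str], levels: int) -> int:
--     """Calculate total length of expanded path."""
--     return sum(transition_length(sequence[i], sequence[i + 1], levels) for i in range(len(sequence) - 1))
--
-- def transition_length(c1: str, c2: str, levels: int) -> int:
--     """Calculate length for transition between two characters."""
--     if (c1, c2, levels) in length_cache:
--         return length_cache[(c1, c2, levels)]
--
--     paths = PATHS_BETWEEN_CHARACTERS_2X3[(c1, c2)]
--
--     if levels == 1:
--         # Base case: we hit bottom and we just return the length
--         result = min(len(path + ["A"]) for path in paths)
--     else:
--         # Recursive case: we expand the path one level deeper
--         result = min(expand_length(["A"] + path + ["A"], levels - 1) for path in paths)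
--
--     length_cache[(c1, c2, levels)] = result
--     return result
-- ===== SOURCE B (Python) =====
-- PATHS_BETWEEN_CHARACTERS_2X3 = {
--     ("^", "A"): [[">"]],
--     ("^", "v"): [["v"]],
--     ("^", ">"): [[">", "v"], ["v", ">"]],
--     ("^", "^"): [[]],
--     ("^", "<"): [["v", "<"]],
--     ("A", "A"): [[]],
--     ("A", "v"): [["<", "v"], ["v", "<"]],
--     ("A", ">"): [["v"]],
--     ("A", "^"): [["<"]],
--     ("A", "<"): [["v", "<", "<"], ["<", "v", "<"]],
--     (">", "A"): [["^"]],
--     (">", "v"): [["<"]],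
--     (">", ">"): [[]],
--     (">", "^"): [["<", "^"], ["^", "<"]],
--     (">", "<"): [["<", "<"]],
--     ("v", "A"): [["^", ">"], [">", "^"]],
--     ("v", "v"): [[]],
--     ("v", ">"): [[">"]],
--     ("v", "^"): [["^"]],
--     ("v", "<"): [["<"]],
--     ("<", "A"): [[">", ">", "^"], [">", "^", ">"]],
--     ("<", "v"): [[">"]],
--     ("<", ">"): [[">", ">"]],
--     ("<", "^"): [[">", "^"]],
--     ("<", "<"): [[]],
-- }
--
--
-- def transition_length(c1: str, c2: str, levels: int) -> int:
--     """Bottom-up DP: cost table per level over all 25 key pairs, no recursion."""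
--     cost = {k: min(len(p) + 1 for p in ps) for k, ps in PATHS_BETWEEN_CHARACTERS_2X3.items()}
--     for _ in range(levels - 1):
--         prev = cost
--         cost = {
--             k: min(sum(prev[(x, y)] for x, y in zip(["A"] + p, p + ["A"])) for p in ps)
--             for k, ps in PATHS_BETWEEN_CHARACTERS_2X3.items()
--         }
--     return cost[(c1, c2)]
-- ===== Notes on version B (the rewrite author's own statement) =====
-- stated objective: alternative
-- what changed: Replaces the top-down memoized mutual recursion (transition_length/expand_length with a global cache) by an iterative bottom-up dynamic program that builds, level by level, a cost table over all 25 key pairs and reads off the answer.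
import Mathlib
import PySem

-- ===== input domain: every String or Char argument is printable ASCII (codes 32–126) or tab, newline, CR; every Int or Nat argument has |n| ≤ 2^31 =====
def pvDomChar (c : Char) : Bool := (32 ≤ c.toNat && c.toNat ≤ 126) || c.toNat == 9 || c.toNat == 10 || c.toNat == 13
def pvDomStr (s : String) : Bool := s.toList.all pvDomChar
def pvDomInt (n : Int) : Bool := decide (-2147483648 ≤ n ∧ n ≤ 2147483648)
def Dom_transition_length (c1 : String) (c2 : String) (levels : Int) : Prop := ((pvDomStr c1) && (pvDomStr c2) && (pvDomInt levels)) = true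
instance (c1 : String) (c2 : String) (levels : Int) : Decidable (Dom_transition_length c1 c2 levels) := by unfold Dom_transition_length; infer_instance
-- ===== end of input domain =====

-- B replaces A's top-down memoized recursion (global length_cache) by a bottom-up per-level DP table over all 25 key pairs (alternative decomposition, same cost).

-- ===== PORT A =====
-- The module constant PATHS_BETWEEN_CHARACTERS_2X3, shared by both ports (both Pythons carry the same literal dict).
def pvPaths : List ((String × String) × List (List String)) :=
  [ (("^", "A"), [[">"]]),
    (("^", "v"), [["v"]]),
    (("^", ">"), [[">", "v"], ["v", ">"]]),
    (("^", "^"), [[]]),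
    (("^", "<"), [["v", "<"]]),
    (("A", "A"), [[]]),
    (("A", "v"), [["<", "v"], ["v", "<"]]),
    (("A", ">"), [["v"]]),
    (("A", "^"), [["<"]]),
    (("A", "<"), [["v", "<", "<"], ["<", "v", "<"]]),
    ((">", "A"), [["^"]]),
    ((">", "v"), [["<"]]),
    ((">", ">"), [[]]),
    ((">", "^"), [["<", "^"], ["^", "<"]]),
    ((">", "<"), [["<", "<"]]),
    (("v", "A"), [["^", ">"], [">", "^"]]),
    (("v", "v"), [[]]),
    (("v", ">"), [[">"]]),
    (("v", "^"), [["^"]]),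
    (("v", "<"), [["<"]]),
    (("<", "A"), [[">", ">", "^"], [">", "^", ">"]]),
    (("<", "v"), [[">"]]),
    (("<", ">"), [[">", ">"]]),
    (("<", "^"), [[">", "^"]]),
    (("<", "<"), [[]]) ]

def pvDict : PySem.Dict (String × String) (List (List String)) := PySem.Dict.mk pvPaths

-- PATHS_BETWEEN_CHARACTERS_2X3[(c1, c2)]: KeyError (none) is excluded by Pre_; getD [] is a total stand-in there.
def pvPathsFor (c1 : String) (c2 : String) : List (List String) :=
  (pvDict.get? (c1, c2)).getD []

-- A's length_cache, threaded explicitly (each top-level call starts empty; the cache is pure memoization, so the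
-- values agree with Python's persistent global cache). levels as Nat fuel: Pre_ guarantees levels ≥ 1, where
-- Int→Nat is exact, and levels ≤ 0 makes the Python recurse forever (outside Pre_), so the 0 branch is unreachable.
abbrev pvCache := PySem.Dict (String × String × Nat) Int

-- expand_length: sum(transition_length(seq[i], seq[i+1], levels) for i in range(len(seq)-1)) — the sum over
-- consecutive pairs as structural recursion, threading the cache; the mutual recursion is untangled by handing
-- it the level-(levels) transition function so that the fuel recursion stays structural.
def pvExpandAM (f : String → String → pvCache → Int × pvCache) : List String → pvCache → Int × pvCache
  | [], c => (0, c)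
  | [_], c => (0, c)
  | a :: b :: rest, c =>
    let vc := f a b c
    let rc := pvExpandAM f (b :: rest) vc.2
    (vc.1 + rc.1, rc.2)

-- the generator 'expand_length(["A"] + path + ["A"], levels - 1) for path in paths', evaluated left to right
-- with the cache threaded through
def pvEachPathM (f : String → String → pvCache → Int × pvCache) : List (List String) → pvCache → List Int × pvCache
  | [], c => ([], c)
  | p :: ps, c =>
    let vc := pvExpandAM f (["A"] ++ p ++ ["A"]) c
    let rc := pvEachPathM f ps vc.2
    (vc.1 :: rc.1, rc.2)

-- transition_length with its cache: check length_cache first, else compute (base case at levels == 1, recursive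
-- case otherwise), then store. min(...) is PySem.List.min?; the path list of a valid key is never empty, so
-- .getD 0 is a total stand-in for Python's min-of-empty ValueError.
def pvTransAM : Nat → String → String → pvCache → Int × pvCache
  | 0, _, _, cache => (0, cache)   -- unreachable under Pre_ (Python diverges for levels ≤ 0; nothing is ever cached at level 0)
  | 1, c1, c2, cache =>
    match cache.get? (c1, c2, 1) with
    | some v => (v, cache)
    | none =>
      let r := (PySem.List.min? ((pvPathsFor c1 c2).map (fun p => ((p ++ ["A"]).length : Int))) (fun x => x)).getD 0
      (r, cache.insert (c1, c2, 1) r)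
  | n + 2, c1, c2, cache =>
    match cache.get? (c1, c2, n + 2) with
    | some v => (v, cache)
    | none =>
      let vc := pvEachPathM (fun a b c => pvTransAM (n + 1) a b c) (pvPathsFor c1 c2) cache
      let r := (PySem.List.min? vc.1 (fun x => x)).getD 0
      (r, vc.2.insert (c1, c2, n + 2) r)

def transition_length (c1 : String) (c2 : String) (levels : Int) : Int :=
  (pvTransAM levels.toNat c1 c2 PySem.Dict.empty).1

-- ===== PORT B =====
-- cost = {k: min(len(p) + 1 for p in ps) for k, ps in PATHS....items()}
def pvBase : PySem.Dict (String × String) Int :=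
  PySem.Dict.mk (pvPaths.map (fun kp =>
    (kp.1, (PySem.List.min? (kp.2.map (fun p => ((p.length : Int) + 1))) (fun x => x)).getD 0)))

-- sum(prev[(x, y)] for x, y in zip(["A"] + p, p + ["A"])); prev[...] always hits a key here, getD 0 is the total stand-in.
def pvPairCost (prev : PySem.Dict (String × String) Int) (p : List String) : Int :=
  ((List.zip ("A" :: p) (p ++ ["A"])).map (fun xy => (prev.get? xy).getD 0)).sum

-- one pass of the 'for _ in range(levels - 1)' loop: rebuild the table from the previous one
def pvStep (prev : PySem.Dict (String × String) Int) : PySem.Dict (String × String) Int :=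
  PySem.Dict.mk (pvPaths.map (fun kp =>
    (kp.1, (PySem.List.min? (kp.2.map (pvPairCost prev)) (fun x => x)).getD 0)))

def transition_length_alt (c1 : String) (c2 : String) (levels : Int) : Int :=
  (((pvStep^[(levels - 1).toNat]) pvBase).get? (c1, c2)).getD 0

-- ===== PRECONDITION & SPEC =====
-- Pre_ excludes only inputs on which A raises or never returns: key pairs absent from the dict (Python KeyError)
-- and levels ≤ 0 (A's recursion descends forever: RecursionError, no value).
def Pre_transition_length (c1 : String) (c2 : String) (levels : Int) : Prop :=
  (c1, c2) ∈ pvPaths.map Prod.fst ∧ 1 ≤ levels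
instance (c1 : String) (c2 : String) (levels : Int) : Decidable (Pre_transition_length c1 c2 levels) := by
  unfold Pre_transition_length; infer_instance

def pvWitness_transition_length : String × String × Int := ("<", "A", 3)

def Spec_transition_length (c1 : String) (c2 : String) (levels : Int) (out : Int) : Prop := out = transition_length_alt c1 c2 levels
instance (c1 : String) (c2 : String) (levels : Int) (out : Int) : Decidable (Spec_transition_length c1 c2 levels out) := by unfold Spec_transition_length; infer_instance

-- ===== CLAIM (what is proved, stated in full; the proofs are below) =====
def Claim_equal_transition_length : Prop := ∀ (c1 : String) (c2 : String) (levels : Int), Dom_transition_length c1 c2 levels → Pre_transition_length c1 c2 levels → Spec_transition_length c1 c2 levels (transition_length c1 c2 levels)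

-- ===== LEMMAS AND PROOFS =====

-- pure (cache-free) reference for A's recursion, used only by the proofs
def pvExpandP (g : String → String → Int) : List String → Int
  | [] => 0
  | [_] => 0
  | a :: b :: rest => g a b + pvExpandP g (b :: rest)

def pvTransP : Nat → String → String → Int
  | 0, _, _ => 0
  | 1, c1, c2 => (PySem.List.min? ((pvPathsFor c1 c2).map (fun p => ((p ++ ["A"]).length : Int))) (fun x => x)).getD 0
  | n + 2, c1, c2 =>
    (PySem.List.min? ((pvPathsFor c1 c2).map (fun p => pvExpandP (pvTransP (n + 1)) (["A"] ++ p ++ ["A"]))) (fun x => x)).getD 0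

-- the memo-cache invariant: every stored value is the pure value
def pvInv (cache : pvCache) : Prop :=
  ∀ a b l v, cache.get? (a, b, l) = some v → v = pvTransP l a b

lemma pvInv_empty : pvInv PySem.Dict.empty := by
  intro a b l v h
  simp [PySem.Dict.get?_empty] at h

lemma pvExpandAM_spec {f : String → String → pvCache → Int × pvCache} {g : String → String → Int}
    (hf : ∀ a b c, pvInv c → (f a b c).1 = g a b ∧ pvInv (f a b c).2) :
    ∀ (seq : List String) (c : pvCache), pvInv c →
      (pvExpandAM f seq c).1 = pvExpandP g seq ∧ pvInv (pvExpandAM f seq c).2 := by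
  intro seq
  induction seq with
  | nil => intro c hc; simpa [pvExpandAM, pvExpandP] using hc
  | cons a rest ih =>
    intro c hc
    match rest with
    | [] => simpa [pvExpandAM, pvExpandP] using hc
    | b :: rest' =>
      obtain ⟨h1, h2⟩ := hf a b c hc
      obtain ⟨h3, h4⟩ := ih (f a b c).2 h2
      refine ⟨?_, by simpa [pvExpandAM] using h4⟩
      simp [pvExpandAM, pvExpandP, h1, h3]

lemma pvEachPathM_spec {f : String → String → pvCache → Int × pvCache} {g : String → String → Int}
    (hf : ∀ a b c, pvInv c → (f a b c).1 = g a b ∧ pvInv (f a b c).2) :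
    ∀ (ps : List (List String)) (c : pvCache), pvInv c →
      (pvEachPathM f ps c).1 = ps.map (fun p => pvExpandP g ("A" :: (p ++ ["A"]))) ∧
      pvInv (pvEachPathM f ps c).2 := by
  intro ps
  induction ps with
  | nil => intro c hc; simpa [pvEachPathM] using hc
  | cons p ps' ih =>
    intro c hc
    obtain ⟨h1, h2⟩ := pvExpandAM_spec hf ("A" :: (p ++ ["A"])) c hc
    obtain ⟨h3, h4⟩ := ih (pvExpandAM f ("A" :: (p ++ ["A"])) c).2 h2
    refine ⟨?_, by simpa [pvEachPathM] using h4⟩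
    simp [pvEachPathM, h1, h3]

lemma pvInv_insert {c : pvCache} (hc : pvInv c) (k : String × String × Nat) :
    pvInv (c.insert k (pvTransP k.2.2 k.1 k.2.1)) := by
  intro a b l v h
  rw [PySem.Dict.get?_insert] at h
  split at h
  · rename_i heq
    cases heq
    cases h
    rfl
  · exact hc a b l v h

lemma pvTransAM_spec : ∀ (lv : Nat) (c1 c2 : String) (cache : pvCache), pvInv cache →
    (pvTransAM lv c1 c2 cache).1 = pvTransP lv c1 c2 ∧ pvInv (pvTransAM lv c1 c2 cache).2 := by
  intro lv
  induction lv using Nat.strong_induction_on with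
  | _ lv ih =>
    match lv with
    | 0 => intro c1 c2 cache hc; simpa [pvTransAM, pvTransP] using hc
    | 1 =>
      intro c1 c2 cache hc
      cases h : cache.get? (c1, c2, 1) with
      | some v =>
        refine ⟨?_, by simpa [pvTransAM, h] using hc⟩
        simpa [pvTransAM, h, pvTransP] using hc c1 c2 1 v h
      | none =>
        refine ⟨by simp [pvTransAM, h, pvTransP], ?_⟩
        have := pvInv_insert hc (c1, c2, 1)
        simpa [pvTransAM, h, pvTransP] using this
    | n + 2 =>
      intro c1 c2 cache hc
      have hf : ∀ a b c, pvInv c →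
          (pvTransAM (n + 1) a b c).1 = pvTransP (n + 1) a b ∧ pvInv (pvTransAM (n + 1) a b c).2 :=
        fun a b c hcc => ih (n + 1) (by omega) a b c hcc
      cases h : cache.get? (c1, c2, n + 2) with
      | some v =>
        refine ⟨?_, by simpa [pvTransAM, h] using hc⟩
        simpa [pvTransAM, h] using hc c1 c2 (n + 2) v h
      | none =>
        obtain ⟨h1, h2⟩ := pvEachPathM_spec hf (pvPathsFor c1 c2) cache hc
        constructor
        · simp [pvTransAM, h, h1, pvTransP]
        · have := pvInv_insert h2 (c1, c2, n + 2)
          have hval : (PySem.List.min? (pvEachPathM (fun a b c => pvTransAM (n + 1) a b c) (pvPathsFor c1 c2) cache).1 (fun x => x)).getD 0 = pvTransP (n + 2) c1 c2 := by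
            simp [h1, pvTransP]
          simpa [pvTransAM, h, hval] using this

-- ===== linking A's pure recursion to B's DP table =====
lemma pvPaths_keys_nodup : (pvPaths.map Prod.fst).Nodup := by decide

-- every consecutive pair along ["A"] + p + ["A"] for a stored path p is itself a stored key pair
lemma pvPairs_closed :
    ∀ kp ∈ pvPaths, ∀ p ∈ kp.2, ∀ xy ∈ List.zip ("A" :: p) (p ++ ["A"]),
      xy ∈ pvPaths.map Prod.fst := by decide

lemma pvPathsFor_eq {k : String × String} {ps : List (List String)}
    (h : (k, ps) ∈ pvPaths) : pvPathsFor k.1 k.2 = ps := by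
  have : pvDict.get? (k.1, k.2) = some ps := by
    exact PySem.Dict.get?_of_mem_items _ h pvPaths_keys_nodup
  simp [pvPathsFor, this]

lemma pvStep_get? (T : PySem.Dict (String × String) Int)
    {k : String × String} {ps : List (List String)} (h : (k, ps) ∈ pvPaths) :
    (pvStep T).get? k = some ((PySem.List.min? (ps.map (pvPairCost T)) (fun x => x)).getD 0) := by
  have hk : (pvStep T).keys.Nodup := by
    have : (pvStep T).keys = pvPaths.map Prod.fst := by
      simp [pvStep, PySem.Dict.keys, List.map_map, Function.comp]
    rw [this]; exact pvPaths_keys_nodup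
  have hmem : (k, (PySem.List.min? (ps.map (pvPairCost T)) (fun x => x)).getD 0) ∈ (pvStep T).items := by
    have := List.mem_map_of_mem (f := fun kp => (kp.1, (PySem.List.min? (kp.2.map (pvPairCost T)) (fun x => x)).getD 0)) h
    simpa [pvStep, PySem.Dict.items] using this
  exact PySem.Dict.get?_of_mem_items _ hmem hk

-- the pure expand over ["A"]+p+["A"] is the sum of g over the zipped consecutive pairs
lemma pvExpandP_eq_sum (g : String → String → Int) :
    ∀ (p : List String) (a : String),
      pvExpandP g (a :: (p ++ ["A"]))
        = ((List.zip (a :: p) (p ++ ["A"])).map (fun xy => g xy.1 xy.2)).sum := by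
  intro p
  induction p with
  | nil => intro a; simp [pvExpandP]
  | cons x xs ih => intro a; simp [pvExpandP, ih x]

lemma pvMain : ∀ (n : Nat), ∀ k ∈ pvPaths.map Prod.fst,
    pvTransP (n + 1) k.1 k.2 = (((pvStep^[n]) pvBase).get? k).getD 0 := by
  intro n
  induction n with
  | zero => decide
  | succ m ih =>
    intro k hk
    obtain ⟨kp, hkp, rfl⟩ := List.mem_map.mp hk
    set T := (pvStep^[m]) pvBase with hT
    have hiter : (pvStep^[m + 1]) pvBase = pvStep T := by
      rw [Function.iterate_succ_apply']
    rw [hiter, pvStep_get? T (k := kp.1) (ps := kp.2) (by simpa using hkp)]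
    have hpf : pvPathsFor kp.1.1 kp.1.2 = kp.2 := pvPathsFor_eq (by simpa using hkp)
    have hcong : ∀ p ∈ kp.2,
        pvExpandP (pvTransP (m + 1)) (["A"] ++ p ++ ["A"]) = pvPairCost T p := by
      intro p hp
      have h1 : (["A"] : List String) ++ p ++ ["A"] = "A" :: (p ++ ["A"]) := by simp
      rw [h1, pvExpandP_eq_sum (pvTransP (m + 1)) p "A", pvPairCost]
      congr 1
      apply List.map_congr_left
      intro xy hxy
      exact ih xy (pvPairs_closed kp hkp p hp xy hxy)
    show pvTransP (m + 2) kp.1.1 kp.1.2 = _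
    rw [pvTransP, hpf, List.map_congr_left hcong]
    simp

-- ===== VERDICT (by name: the statement is the Claim_ definition above) =====
theorem transition_length_spec : Claim_equal_transition_length := by
  intro c1 c2 levels _ hpre
  obtain ⟨hk, h1⟩ := hpre
  unfold Spec_transition_length transition_length transition_length_alt
  have hmemo := (pvTransAM_spec levels.toNat c1 c2 PySem.Dict.empty pvInv_empty).1
  rw [hmemo]
  have hn : levels.toNat = (levels - 1).toNat + 1 := by omega
  rw [hn]
  exact pvMain ((levels - 1).toNat) (c1, c2) hk
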